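-- pv_equiv track=rewrite | github.com/Dipankar-Medhi/DSA-with-Python | Educative/sliding-window/string-anagram.py | findStringAnagram
-- ===== SOURCE A (Python) =====
-- def findStringAnagram(s, p):
--     start = 0
--     matched = 0
--     char_freq = {}
--     result = []
--
--     # store the char freq of the pattern in the hashmap
--     for char in p:
--         char_freq[char] = char_freq.get(char, 0) + 1
--
--     for end in range(len(s)):
--         right_char = s[end]
--
--         # increment matched for if found in charfreq
--         if right_char in char_freq:
--             char_freq[right_char] -= 1
--             if char_freq[right_char] == 0:  # chars found
--                 matched += 1
--
--         # all chars found --> store the start index of the window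
--         if matched == len(char_freq):
--             result.append((start, end))
--
--         if end >= len(p) - 1:
--             left_char = s[start]
--             start += 1
--             if left_char in char_freq:
--
--                 # if already found, then reduce the matched cause
--                 # it is being removed, and it is no more found.
--                 if char_freq[left_char] == 0:
--                     matched -= 1
--
--                 # considering the outgoing element as present in the map
--                 # for future window events. So that it is taken as found.
--                 char_freq[left_char] += 1
--
--     return result
-- ===== SOURCE B (Python) =====
-- def findStringAnagram(s, p):
--     m = len(p)
--     target = sorted(p)
--     result = []
--     for i in range(len(s) - m + 1):
--         if sorted(s[i:i + m]) == target:
--             result.append((i, i + m - 1))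
--     return result
-- ===== Notes on version B (the rewrite author's own statement) =====
-- stated objective: simpler
-- what changed: Replaces the incremental sliding-window frequency/matched bookkeeping with a direct loop that compares sorted(s[i:i+len(p)]) against sorted(p) for each window start.
-- intended difference: On empty p, A returns the accidental length-1 pairs [(i, i) for i in range(len(s))] while B returns the zero-length windows [(i, i-1) for i in range(len(s)+1)], which is what a window loop intends for an empty pattern. — e.g. on findStringAnagram("a", ""): A returns [(0, 0)], B returns [(0, -1), (1, 0)]
import Mathlib
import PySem

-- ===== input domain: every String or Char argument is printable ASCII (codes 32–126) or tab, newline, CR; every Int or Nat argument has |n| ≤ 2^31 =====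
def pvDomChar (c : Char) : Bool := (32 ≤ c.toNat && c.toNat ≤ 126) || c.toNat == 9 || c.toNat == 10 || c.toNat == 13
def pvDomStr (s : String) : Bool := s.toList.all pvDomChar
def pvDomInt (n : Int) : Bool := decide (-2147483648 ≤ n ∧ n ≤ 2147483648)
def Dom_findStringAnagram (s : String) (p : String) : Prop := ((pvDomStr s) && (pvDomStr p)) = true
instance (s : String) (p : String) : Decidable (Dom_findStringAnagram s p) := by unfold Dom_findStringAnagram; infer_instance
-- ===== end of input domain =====

-- B re-implements the sliding-window matcher by freshly sorting each window and comparing it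
-- with sorted(p) (objective: simpler); on empty p the two differ as stated at D_ below.

-- ===== PORT A =====
-- one iteration of A's main loop; state = (start, matched, char_freq, result)
def aStep (sl pl : List Char) (st : Int × Int × PySem.Dict Char Int × List (Int × Int))
    (endI : Int) : Int × Int × PySem.Dict Char Int × List (Int × Int) :=
  let start := st.1
  let matched := st.2.1
  let charFreq := st.2.2.1
  let result := st.2.2.2
  let rightChar := PySem.List.pyGetD sl endI ' '  -- s[end]: endI ∈ range(len(s)), in range, so exact
  let (matched, charFreq) :=
    if charFreq.contains rightChar then
      let charFreq := charFreq.insert rightChar (charFreq.getD rightChar 0 - 1)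
      ((if charFreq.getD rightChar 0 = 0 then matched + 1 else matched), charFreq)
    else (matched, charFreq)
  let result := if matched = (charFreq.size : Int) then result ++ [(start, endI)] else result
  if endI ≥ (pl.length : Int) - 1 then
    let leftChar := PySem.List.pyGetD sl start ' '  -- s[start]: 0 ≤ start ≤ end, in range, so exact
    let start := start + 1
    let (matched, charFreq) :=
      if charFreq.contains leftChar then
        ((if charFreq.getD leftChar 0 = 0 then matched - 1 else matched),
         charFreq.insert leftChar (charFreq.getD leftChar 0 + 1))
      else (matched, charFreq)
    (start, matched, charFreq, result)
  else
    (start, matched, charFreq, result)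

def findStringAnagram (s : String) (p : String) : List (Int × Int) :=
  let charFreq : PySem.Dict Char Int :=
    p.toList.foldl (fun d c => d.insert c (d.getD c 0 + 1)) PySem.Dict.empty
  (List.foldl (aStep s.toList p.toList) (0, 0, charFreq, [])
    (PySem.List.pyRange 0 (s.toList.length : Int) 1)).2.2.2

-- ===== PORT B =====
-- one iteration of B's loop: compare the freshly sorted window s[i:i+m] with target
def bStep (sl : List Char) (m : Int) (target : List Char)
    (result : List (Int × Int)) (i : Int) : List (Int × Int) :=
  if PySem.List.sorted (PySem.List.slice sl (some i) (some (i + m))) (fun c => c) false = target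
  then result ++ [(i, i + m - 1)] else result

def findStringAnagram_alt (s : String) (p : String) : List (Int × Int) :=
  let m : Int := (p.toList.length : Int)
  let target := PySem.List.sorted p.toList (fun c => c) false
  List.foldl (bStep s.toList m target) []
    (PySem.List.pyRange 0 ((s.toList.length : Int) - m + 1) 1)

-- ===== PRECONDITION & SPEC =====
-- On empty p, A returns the accidental windows [(i, i) for i in range(len(s))] while B returns
-- the zero-length windows [(i, i-1) for i in range(len(s)+1)], the value a window loop intends.
def D_findStringAnagram (s : String) (p : String) : Prop := p.toList = []
instance (s : String) (p : String) : Decidable (D_findStringAnagram s p) := by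
  unfold D_findStringAnagram; infer_instance

def Spec_findStringAnagram (s : String) (p : String) (out : List (Int × Int)) : Prop :=
  ¬ D_findStringAnagram s p → out = findStringAnagram_alt s p
instance (s : String) (p : String) (out : List (Int × Int)) : Decidable (Spec_findStringAnagram s p out) := by
  unfold Spec_findStringAnagram; infer_instance

def pvDiffWitness_findStringAnagram : String × String := ("a", "")
def pvDiffWitnessOut_findStringAnagram : (List (Int × Int)) × (List (Int × Int)) :=
  ([(0, 0)], [(0, -1), (1, 0)])

-- ===== CLAIM (what is proved, stated in full; the proofs are below) =====
def Claim_unchanged_findStringAnagram : Prop := ∀ (s : String) (p : String),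
  Dom_findStringAnagram s p → Spec_findStringAnagram s p (findStringAnagram s p)
def Claim_changed_findStringAnagram : Prop :=
  Dom_findStringAnagram (pvDiffWitness_findStringAnagram.1) (pvDiffWitness_findStringAnagram.2) ∧
  D_findStringAnagram (pvDiffWitness_findStringAnagram.1) (pvDiffWitness_findStringAnagram.2) ∧
  findStringAnagram (pvDiffWitness_findStringAnagram.1) (pvDiffWitness_findStringAnagram.2) = pvDiffWitnessOut_findStringAnagram.1 ∧
  findStringAnagram_alt (pvDiffWitness_findStringAnagram.1) (pvDiffWitness_findStringAnagram.2) = pvDiffWitnessOut_findStringAnagram.2 ∧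
  pvDiffWitnessOut_findStringAnagram.1 ≠ pvDiffWitnessOut_findStringAnagram.2
def Claim_exact_findStringAnagram : Prop := ∀ (s : String) (p : String),
  Dom_findStringAnagram s p → D_findStringAnagram s p →
  findStringAnagram s p ≠ findStringAnagram_alt s p

-- ===== LEMMAS AND PROOFS =====

-- the window s[ws:k] of A, as a list
def win (sl : List Char) (ws k : Nat) : List Char := (sl.drop ws).take (k - ws)

-- A's loop state after k iterations (its char_freq starts as Counter(p))
def aRun (sl pl : List Char) (k : Nat) : Int × Int × PySem.Dict Char Int × List (Int × Int) :=
  List.foldl (aStep sl pl) (0, 0, PySem.Dict.counter pl, []) (PySem.List.pyRange 0 (k : Int) 1)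

-- B's accumulated result over the first q window positions
def bRun (sl pl : List Char) (q : Int) : List (Int × Int) :=
  List.foldl (bStep sl (pl.length : Int) (PySem.List.sorted pl (fun c => c) false)) []
    (PySem.List.pyRange 0 q 1)

lemma aRun_succ (sl pl : List Char) (k : Nat) :
    aRun sl pl (k + 1) = aStep sl pl (aRun sl pl k) (k : Int) := by
  unfold aRun
  rw [show ((k + 1 : Nat) : Int) = (k : Int) + 1 from by push_cast; ring,
    PySem.List.pyRange_one_succ_right (by positivity), List.foldl_append]
  rfl

lemma bRun_succ (sl pl : List Char) (q : Int) (hq : 0 ≤ q) :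
    bRun sl pl (q + 1)
      = bStep sl (pl.length : Int) (PySem.List.sorted pl (fun c => c) false) (bRun sl pl q) q := by
  unfold bRun
  rw [PySem.List.pyRange_one_succ_right hq, List.foldl_append]
  rfl

-- the full invariant of A's loop after k iterations (p nonempty)
def AInv (sl pl : List Char) (k : Nat) : Prop :=
  (aRun sl pl k).1 = ((k - (pl.length - 1) : Nat) : Int) ∧
  (aRun sl pl k).2.2.1.keys = PySem.Set.ofList pl ∧
  (∀ c ∈ pl, (aRun sl pl k).2.2.1.getD c 0
    = (pl.count c : Int) - ((win sl (k - (pl.length - 1)) k).count c : Int)) ∧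
  (aRun sl pl k).2.1
    = ((PySem.Set.ofList pl).countP (fun c => decide ((aRun sl pl k).2.2.1.getD c 0 ≤ 0)) : Int) ∧
  (aRun sl pl k).2.2.2 = bRun sl pl ((k : Int) - pl.length + 1)

-- countP over a nodup list changes only at the one updated position
lemma countP_int_update (K : List Char) (hnd : K.Nodup) {x : Char} (hx : x ∈ K)
    (p q : Char → Bool) (hagree : ∀ c ∈ K, c ≠ x → q c = p c) :
    ((K.countP q : Int)) = (K.countP p : Int)
      + (if q x then 1 else 0) - (if p x then 1 else 0) := by
  induction K with
  | nil => cases hx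
  | cons a K ih =>
    rcases List.nodup_cons.mp hnd with ⟨ha, hndK⟩
    rcases List.mem_cons.mp hx with rfl | hxK
    · have hcong : K.countP q = K.countP p :=
        List.countP_congr (fun c hc => by
          have := hagree c (List.mem_cons_of_mem _ hc) (fun h => ha (h ▸ hc))
          simp [this])
      simp only [List.countP_cons, hcong]
      push_cast
      split_ifs <;> omega
    · have hax : a ≠ x := fun h => ha (h ▸ hxK)
      have hqa : q a = p a := hagree a (List.mem_cons_self) hax
      have := ih hndK hxK (fun c hc hcx => hagree c (List.mem_cons_of_mem _ hc) hcx)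
      simp only [List.countP_cons, hqa]
      push_cast at this ⊢
      split_ifs at this ⊢ <;> omega

-- adding char x on the right of the window preserves the dict/matched bookkeeping
lemma phase_add (pl : List Char) (cf : PySem.Dict Char Int) (w : List Char) (x : Char)
    (hkeys : cf.keys = PySem.Set.ofList pl)
    (hval : ∀ c ∈ pl, cf.getD c 0 = (pl.count c : Int) - (w.count c : Int)) :
    let cf' := if cf.contains x then cf.insert x (cf.getD x 0 - 1) else cf
    cf'.keys = PySem.Set.ofList pl ∧
    (∀ c ∈ pl, cf'.getD c 0 = (pl.count c : Int) - ((w ++ [x]).count c : Int)) ∧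
    ((PySem.Set.ofList pl).countP (fun c => decide (cf'.getD c 0 ≤ 0)) : Int)
      = ((PySem.Set.ofList pl).countP (fun c => decide (cf.getD c 0 ≤ 0)) : Int)
        + (if cf.contains x then (if cf'.getD x 0 = 0 then (1:Int) else 0) else 0) := by
  intro cf'
  have hmem : cf.contains x = true ↔ x ∈ pl := by
    rw [PySem.Dict.contains_eq_decide_mem_keys, hkeys]
    simp [PySem.Set.mem_ofList]
  by_cases hc : cf.contains x = true
  · have hxpl : x ∈ pl := hmem.mp hc
    have hcf' : cf' = cf.insert x (cf.getD x 0 - 1) := by simp [cf', hc]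
    refine ⟨by rw [hcf', PySem.Dict.keys_insert_of_contains cf _ hc]; exact hkeys, ?_, ?_⟩
    · intro c hcpl
      rw [hcf', PySem.Dict.getD_insert]
      by_cases hcx : c = x
      · subst hcx
        rw [if_pos rfl, hval c hcpl]
        simp [List.count_append]
        ring
      · rw [if_neg hcx, hval c hcpl]
        simp [List.count_append, show ¬ x = c from fun h => hcx h.symm]
    · rw [if_pos hc]
      have := countP_int_update (PySem.Set.ofList pl) (PySem.Set.nodup_ofList pl)
        ((PySem.Set.mem_ofList pl x).mpr hxpl)
        (fun c => decide (cf.getD c 0 ≤ 0)) (fun c => decide (cf'.getD c 0 ≤ 0))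
        (fun c _ hcx => by simp [hcf', PySem.Dict.getD_insert, hcx])
      rw [this]
      have hx' : cf'.getD x 0 = cf.getD x 0 - 1 := by
        rw [hcf', PySem.Dict.getD_insert, if_pos rfl]
      simp only [decide_eq_true_eq, hx']
      split_ifs <;> omega
  · have hxpl : x ∉ pl := fun h => hc (hmem.mpr h)
    have hcf' : cf' = cf := by simp [cf', hc]
    refine ⟨hcf' ▸ hkeys, ?_, by simp [hcf', hc]⟩
    intro c hcpl
    have hcx : ¬ (x = c) := fun h => hxpl (h ▸ hcpl)
    rw [hcf', hval c hcpl]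
    simp [List.count_append, hcx]

-- removing char y on the left of the window preserves the dict/matched bookkeeping
lemma phase_remove (pl : List Char) (cf : PySem.Dict Char Int) (w' : List Char) (y : Char)
    (hkeys : cf.keys = PySem.Set.ofList pl)
    (hval : ∀ c ∈ pl, cf.getD c 0 = (pl.count c : Int) - ((y :: w').count c : Int)) :
    let cf' := if cf.contains y then cf.insert y (cf.getD y 0 + 1) else cf
    cf'.keys = PySem.Set.ofList pl ∧
    (∀ c ∈ pl, cf'.getD c 0 = (pl.count c : Int) - (w'.count c : Int)) ∧
    ((PySem.Set.ofList pl).countP (fun c => decide (cf'.getD c 0 ≤ 0)) : Int)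
      = ((PySem.Set.ofList pl).countP (fun c => decide (cf.getD c 0 ≤ 0)) : Int)
        + (if cf.contains y then (if cf.getD y 0 = 0 then (-1:Int) else 0) else 0) := by
  intro cf'
  have hmem : cf.contains y = true ↔ y ∈ pl := by
    rw [PySem.Dict.contains_eq_decide_mem_keys, hkeys]
    simp [PySem.Set.mem_ofList]
  by_cases hc : cf.contains y = true
  · have hypl : y ∈ pl := hmem.mp hc
    have hcf' : cf' = cf.insert y (cf.getD y 0 + 1) := by simp [cf', hc]
    refine ⟨by rw [hcf', PySem.Dict.keys_insert_of_contains cf _ hc]; exact hkeys, ?_, ?_⟩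
    · intro c hcpl
      rw [hcf', PySem.Dict.getD_insert]
      by_cases hcy : c = y
      · subst hcy
        rw [if_pos rfl, hval c hcpl]
        simp
        ring
      · rw [if_neg hcy, hval c hcpl]
        simp [show ¬ y = c from fun h => hcy h.symm]
    · rw [if_pos hc]
      have := countP_int_update (PySem.Set.ofList pl) (PySem.Set.nodup_ofList pl)
        ((PySem.Set.mem_ofList pl y).mpr hypl)
        (fun c => decide (cf.getD c 0 ≤ 0)) (fun c => decide (cf'.getD c 0 ≤ 0))
        (fun c _ hcy => by simp [hcf', PySem.Dict.getD_insert, hcy])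
      rw [this]
      have hy' : cf'.getD y 0 = cf.getD y 0 + 1 := by
        rw [hcf', PySem.Dict.getD_insert, if_pos rfl]
      simp only [decide_eq_true_eq, hy']
      split_ifs <;> omega
  · have hypl : y ∉ pl := fun h => hc (hmem.mpr h)
    have hcf' : cf' = cf := by simp [cf', hc]
    refine ⟨hcf' ▸ hkeys, ?_, by simp [hcf', hc]⟩
    intro c hcpl
    have hcy : ¬ (y = c) := fun h => hypl (h ▸ hcpl)
    rw [hcf', hval c hcpl]
    simp [hcy]

lemma AInv_zero (sl pl : List Char) (hm : 1 ≤ pl.length) : AInv sl pl 0 := by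
  unfold AInv aRun bRun
  rw [show ((0 : Nat) : Int) = 0 from rfl, PySem.List.pyRange_one_eq_nil (le_refl 0)]
  rw [PySem.List.pyRange_one_eq_nil (by omega)]
  refine ⟨by simp, by simp [PySem.Dict.keys_counter], ?_, ?_, rfl⟩
  · intro c hc
    simp [win, PySem.Dict.getD_counter]
  · simp only [List.foldl]
    have h0 : (PySem.Set.ofList pl).countP (fun c => List.count c pl = 0) = 0 := by
      apply List.countP_eq_zero.mpr
      intro c hc
      have hcpl : c ∈ pl := (PySem.Set.mem_ofList pl c).mp hc
      have : 1 ≤ pl.count c := List.one_le_count_iff.mpr hcpl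
      simp
      omega
    simp [PySem.Dict.getD_counter, h0]

lemma win_append (sl : List Char) (ws k : Nat) (hws : ws ≤ k) (hk : k < sl.length) :
    win sl ws (k+1) = win sl ws k ++ [sl[k]] := by
  unfold win
  have h1 : k + 1 - ws = (k - ws) + 1 := by omega
  have hlt : k - ws < (sl.drop ws).length := by simp [List.length_drop]; omega
  rw [h1, List.take_succ_eq_append_getElem hlt]
  have h2 : ws + (k - ws) = k := by omega
  simp [List.getElem_drop, h2]

lemma win_cons (sl : List Char) (ws k : Nat) (hws : ws < k) (hk : k ≤ sl.length) :
    win sl ws k = sl[ws]'(by omega) :: win sl (ws+1) k := by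
  unfold win
  rw [List.drop_eq_getElem_cons (by omega)]
  have h1 : k - ws = (k - (ws+1)) + 1 := by omega
  rw [h1, List.take_succ_cons]

lemma win_length (sl : List Char) (ws k : Nat) (hk : k ≤ sl.length) :
    (win sl ws k).length = k - ws := by
  simp [win]; omega

lemma append_cond_iff (pl w' : List Char) :
    (∀ c ∈ pl, (pl.count c : Int) - (w'.count c : Int) ≤ 0) ↔ pl.Subperm w' := by
  rw [List.subperm_ext_iff]
  constructor
  · intro h a ha; have := h a ha; omega
  · intro h c hc; have := h c hc; omega

-- phase 1 of aStep (absorbing s[end]) in the exact shape the port produces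
lemma phase1_shape (pl : List Char) (cf : PySem.Dict Char Int) (w : List Char) (x : Char) (M0 : Int)
    (h2 : cf.keys = PySem.Set.ofList pl)
    (h3 : ∀ c ∈ pl, cf.getD c 0 = (pl.count c : Int) - (w.count c : Int))
    (hM0 : M0 = ((PySem.Set.ofList pl).countP (fun c => decide (cf.getD c 0 ≤ 0)) : Int)) :
    ∃ m1 : Int, ∃ cf1 : PySem.Dict Char Int,
      (if cf.contains x then
        ((if (cf.insert x (cf.getD x 0 - 1)).getD x 0 = 0 then M0 + 1 else M0),
          cf.insert x (cf.getD x 0 - 1))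
      else (M0, cf)) = (m1, cf1) ∧
      cf1.keys = PySem.Set.ofList pl ∧
      (∀ c ∈ pl, cf1.getD c 0 = (pl.count c : Int) - ((w ++ [x]).count c : Int)) ∧
      m1 = ((PySem.Set.ofList pl).countP (fun c => decide (cf1.getD c 0 ≤ 0)) : Int) := by
  have hadd := phase_add pl cf w x h2 h3
  by_cases hc : cf.contains x = true
  · simp only [hc, if_true] at hadd ⊢
    obtain ⟨hK, hV, hC⟩ := hadd
    refine ⟨_, _, rfl, hK, hV, ?_⟩
    rw [hM0]
    by_cases h : (cf.insert x (cf.getD x 0 - 1)).getD x 0 = 0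
    · rw [if_pos h]; rw [if_pos h] at hC; omega
    · rw [if_neg h]; rw [if_neg h] at hC; omega
  · simp only [hc] at hadd ⊢
    obtain ⟨hK, hV, -⟩ := hadd
    exact ⟨_, _, rfl, hK, hV, hM0⟩

-- phase 2 of aStep (dropping s[start]) in the exact shape the port produces
lemma phase2_shape (pl : List Char) (cf : PySem.Dict Char Int) (w' : List Char) (y : Char) (M : Int)
    (h2 : cf.keys = PySem.Set.ofList pl)
    (h3 : ∀ c ∈ pl, cf.getD c 0 = (pl.count c : Int) - ((y :: w').count c : Int))
    (hM : M = ((PySem.Set.ofList pl).countP (fun c => decide (cf.getD c 0 ≤ 0)) : Int)) :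
    ∃ m2 : Int, ∃ cf2 : PySem.Dict Char Int,
      (if cf.contains y then
        ((if cf.getD y 0 = 0 then M - 1 else M), cf.insert y (cf.getD y 0 + 1))
      else (M, cf)) = (m2, cf2) ∧
      cf2.keys = PySem.Set.ofList pl ∧
      (∀ c ∈ pl, cf2.getD c 0 = (pl.count c : Int) - (w'.count c : Int)) ∧
      m2 = ((PySem.Set.ofList pl).countP (fun c => decide (cf2.getD c 0 ≤ 0)) : Int) := by
  have hrem := phase_remove pl cf w' y h2 h3
  by_cases hc : cf.contains y = true
  · simp only [hc, if_true] at hrem ⊢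
    obtain ⟨hK, hV, hC⟩ := hrem
    refine ⟨_, _, rfl, hK, hV, ?_⟩
    rw [hM]
    by_cases h : cf.getD y 0 = 0
    · rw [if_pos h]; rw [if_pos h] at hC; omega
    · rw [if_neg h]; rw [if_neg h] at hC; omega
  · simp only [hc] at hrem ⊢
    obtain ⟨hK, hV, -⟩ := hrem
    exact ⟨_, _, rfl, hK, hV, hM⟩

lemma bRun_nil (sl pl : List Char) (q : Int) (hq : q ≤ 0) : bRun sl pl q = [] := by
  unfold bRun
  rw [PySem.List.pyRange_one_eq_nil hq]
  rfl

-- with empty p, each iteration of A appends one pair and changes nothing else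
lemma aRun_empty_len (sl : List Char) (l : List Int) :
    ∀ st : Int × Int × PySem.Dict Char Int × List (Int × Int),
      st.2.1 = 0 → st.2.2.1 = PySem.Dict.empty →
      ((List.foldl (aStep sl []) st l).2.2.2).length = st.2.2.2.length + l.length := by
  induction l with
  | nil => intro st _ _; simp
  | cons e l ih =>
    intro st hm0 hcf
    obtain ⟨a, b, cf, res⟩ := st
    dsimp only at hm0 hcf
    subst hm0; subst hcf
    simp only [List.foldl]
    have hstep : ∃ a' : Int,
        aStep sl [] (a, 0, PySem.Dict.empty, res) e = (a', 0, PySem.Dict.empty, res ++ [(a, e)]) := by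
      unfold aStep
      simp [PySem.Dict.empty, PySem.Dict.contains, PySem.Dict.size]
      split_ifs <;> exact ⟨_, rfl⟩
    obtain ⟨a', ha'⟩ := hstep
    rw [ha', ih _ rfl rfl]
    simp
    omega

lemma AInv_succ (sl pl : List Char) (hm : 1 ≤ pl.length) (k : Nat) (hk : k < sl.length)
    (ih : AInv sl pl k) : AInv sl pl (k + 1) := by
  unfold AInv at ih ⊢
  obtain ⟨h1, h2, h3, h4, h5⟩ := ih
  rw [aRun_succ]
  generalize hg : aRun sl pl k = st at h1 h2 h3 h4 h5 ⊢
  obtain ⟨a, b, cf, res⟩ := st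
  dsimp only at h1 h2 h3 h4 h5 ⊢
  subst h1
  rw [h4] at ⊢
  have hxg : PySem.List.pyGetD sl ((k : Nat) : Int) ' ' = sl[k] := by
    rw [PySem.List.pyGetD_natCast]; exact List.getD_eq_getElem sl ' ' hk
  have hws_le : k - (pl.length - 1) ≤ k := Nat.sub_le _ _
  have hwin' : win sl (k - (pl.length - 1)) (k + 1) = win sl (k - (pl.length - 1)) k ++ [sl[k]] :=
    win_append sl _ k hws_le hk
  obtain ⟨m1, cf1, hEq1, hK1, hV1, hM1⟩ :=
    phase1_shape pl cf (win sl (k - (pl.length - 1)) k) sl[k] _ h2 h3 rfl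
  rw [← hwin'] at hV1
  dsimp only [aStep]
  simp only [hxg, hEq1]
  have hsize : ((cf1.size : Nat) : Int) = ((PySem.Set.ofList pl).length : Int) := by
    rw [show cf1.size = cf1.keys.length from by simp [PySem.Dict.size, PySem.Dict.keys], hK1]
  have happiff : (m1 = (cf1.size : Int)) ↔ pl.Subperm (win sl (k - (pl.length - 1)) (k + 1)) := by
    rw [hM1, hsize, Nat.cast_inj, List.countP_eq_length, ← append_cond_iff pl _]
    constructor
    · intro h c hc
      have h' := of_decide_eq_true (h c ((PySem.Set.mem_ofList pl c).mpr hc))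
      rw [hV1 c hc] at h'
      exact h'
    · intro h c hc
      have hcpl := (PySem.Set.mem_ofList pl c).mp hc
      rw [decide_eq_true_eq, hV1 c hcpl]
      exact h c hcpl
  by_cases hbig : ((k : Int) ≥ (pl.length : Int) - 1)
  · -- the window is full: A also slides, B gains exactly one candidate position
    simp only [if_pos hbig]
    have hwslt : k - (pl.length - 1) < sl.length := by omega
    have hyg : PySem.List.pyGetD sl ((k - (pl.length - 1) : Nat) : Int) ' '
        = sl[k - (pl.length - 1)]'hwslt := by
      rw [PySem.List.pyGetD_natCast]; exact List.getD_eq_getElem sl ' ' hwslt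
    simp only [hyg]
    have hcons : win sl (k - (pl.length - 1)) (k + 1)
        = sl[k - (pl.length - 1)]'hwslt :: win sl (k - (pl.length - 1) + 1) (k + 1) :=
      win_cons sl _ (k + 1) (by omega) (by omega)
    have hV1' : ∀ c ∈ pl, cf1.getD c 0 = (pl.count c : Int)
        - ((sl[k - (pl.length - 1)]'hwslt :: win sl (k - (pl.length - 1) + 1) (k + 1)).count c : Int) := by
      intro c hc
      rw [hV1 c hc, hcons]
    obtain ⟨m2, cf2, hEq2, hK2, hV2, hM2⟩ :=
      phase2_shape pl cf1 (win sl (k - (pl.length - 1) + 1) (k + 1))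
        (sl[k - (pl.length - 1)]'hwslt) m1 hK1 hV1' hM1
    simp only [hEq2]
    refine ⟨by omega, hK2, ?_, hM2, ?_⟩
    · intro c hc
      rw [show k + 1 - (pl.length - 1) = k - (pl.length - 1) + 1 from by omega]
      exact hV2 c hc
    · 
      have hlen : (win sl (k - (pl.length - 1)) (k + 1)).length = pl.length := by
        rw [win_length sl _ _ (by omega)]; omega
      have hBiff : (PySem.List.sorted (win sl (k - (pl.length - 1)) (k + 1)) (fun c => c) false
          = PySem.List.sorted pl (fun c => c) false)
          ↔ pl.Subperm (win sl (k - (pl.length - 1)) (k + 1)) := by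
        rw [PySem.List.sorted_id_eq_sorted_id_iff_perm]
        constructor
        · intro h; exact h.symm.subperm
        · intro h; exact (h.perm_of_length_le (le_of_eq hlen)).symm
      rw [show ((k + 1 : Nat) : Int) - (pl.length : Int) + 1
          = ((k : Int) - (pl.length : Int) + 1) + 1 from by push_cast; ring]
      rw [bRun_succ sl pl _ (by omega)]
      unfold bStep
      have hslice : PySem.List.slice sl (some ((k : Int) - (pl.length : Int) + 1))
          (some ((k : Int) - (pl.length : Int) + 1 + (pl.length : Int)))
          = win sl (k - (pl.length - 1)) (k + 1) := by
        rw [show ((k : Int) - (pl.length : Int) + 1 + (pl.length : Int)) = ((k + 1 : Nat) : Int)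
            from by omega]
        rw [show ((k : Int) - (pl.length : Int) + 1) = ((k - (pl.length - 1) : Nat) : Int)
            from by omega]
        rw [PySem.List.slice_natCast]
        rfl
      rw [hslice]
      by_cases hP : pl.Subperm (win sl (k - (pl.length - 1)) (k + 1))
      · rw [if_pos (happiff.mpr hP), if_pos (hBiff.mpr hP), h5]
        rw [show ((k : Int) - (pl.length : Int) + 1 + (pl.length : Int) - 1) = ((k : Nat) : Int)
            from by omega]
        rw [show ((k : Int) - (pl.length : Int) + 1) = ((k - (pl.length - 1) : Nat) : Int)
            from by omega]
      · rw [if_neg (fun hcon => hP (happiff.mp hcon)),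
           if_neg (fun hcon => hP (hBiff.mp hcon))]
        exact h5
  · -- the window is still growing: no slide, no append, no new candidate for B
    simp only [if_neg hbig]
    refine ⟨by omega, hK1, ?_, hM1, ?_⟩
    · intro c hc
      rw [show k + 1 - (pl.length - 1) = k - (pl.length - 1) from by omega]
      exact hV1 c hc
    · 
      have hnp : ¬ (m1 = (cf1.size : Int)) := by
        intro h
        have hle := (happiff.mp h).length_le
        rw [win_length sl _ _ (by omega)] at hle
        omega
      rw [if_neg hnp, h5, bRun_nil _ _ _ (by omega), bRun_nil _ _ _ (by push_cast; omega)]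

lemma AInv_all (sl pl : List Char) (hm : 1 ≤ pl.length) :
    ∀ k, k ≤ sl.length → AInv sl pl k := by
  intro k
  induction k with
  | zero => exact fun _ => AInv_zero sl pl hm
  | succ k ih => exact fun h => AInv_succ sl pl hm k (by omega) (ih (by omega))

-- ===== VERDICT (by name: the statement is the Claim_ definition above) =====
theorem findStringAnagram_spec : Claim_unchanged_findStringAnagram := by
  intro s p _ hD
  have hm : 1 ≤ p.toList.length := by
    cases h : p.toList with
    | nil => exact absurd h hD
    | cons a l => simp
  have hinv := AInv_all s.toList p.toList hm s.toList.length (le_refl _)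
  unfold AInv at hinv
  obtain ⟨-, -, -, -, hres⟩ := hinv
  show (List.foldl (aStep s.toList p.toList) (0, 0, _, [])
      (PySem.List.pyRange 0 (s.toList.length : Int) 1)).2.2.2 = _
  rw [PySem.Dict.foldl_insert_getD_add_one_eq_counter]
  unfold aRun bRun at hres
  exact hres

theorem findStringAnagram_changed : Claim_changed_findStringAnagram := by
  unfold Claim_changed_findStringAnagram; decide

theorem findStringAnagram_tight : Claim_exact_findStringAnagram := by
  unfold Claim_exact_findStringAnagram
  intro s p _ hD heq
  unfold D_findStringAnagram at hD
  have hA : (findStringAnagram s p).length = s.toList.length := by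
    show (List.foldl (aStep s.toList p.toList) _ _).2.2.2.length = _
    rw [hD]
    have := aRun_empty_len s.toList (PySem.List.pyRange 0 (s.toList.length : Int) 1)
      (0, 0, List.foldl (fun d c => d.insert c (d.getD c 0 + 1)) PySem.Dict.empty ([] : List Char), [])
      rfl rfl
    rw [this]
    simp [PySem.List.length_pyRange_one]
  have hB : (findStringAnagram_alt s p).length = s.toList.length + 1 := by
    show (List.foldl (bStep s.toList (p.toList.length : Int) _) [] _).length = _
    rw [hD]
    have hcong := PySem.List.foldl_congr_mem
      (PySem.List.pyRange 0 ((s.toList.length : Int) - (([] : List Char).length : Int) + 1) 1)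
      (bStep s.toList (([] : List Char).length : Int) (PySem.List.sorted ([] : List Char) (fun c => c) false))
      (fun acc i => acc ++ [(i, i + (([] : List Char).length : Int) - 1)]) []
      (fun acc i hi => by
        have h0i : (0 : Int) ≤ i := (PySem.List.mem_pyRange_one.mp hi).1
        unfold bStep
        rw [if_pos ?_]
        have hsl : PySem.List.slice s.toList (some i) (some (i + (([] : List Char).length : Int)))
            = [] := by
          simp only [List.length_nil, Nat.cast_zero, add_zero]
          rw [PySem.List.slice_toNat s.toList h0i h0i]
          simp
        rw [hsl])
    rw [hcong, PySem.List.foldl_append_singleton_eq_map]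
    simp [PySem.List.length_pyRange_one]
  rw [heq, hB] at hA
  omega
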